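-- pv_equiv track=rewrite | github.com/davidmwhynot/practice | pythonClass/5/main.py | listTriples
-- ===== SOURCE A (Python) =====
-- def equal(a, b): # taken from coding assignment 2
-- 	for i in a:
-- 		for j in b:
-- 			if i == j:
-- 				break
-- 		else:
-- 			return False
-- 	for i in b:
-- 		for j in a:
-- 			if i == j:
-- 				break
-- 		else:
-- 			return False
-- 	return True
--
-- def listTriples(a):
-- 	buffer = []
-- 	for i in a: # loop through all possible elements in the first index
-- 		for j in a: # loop through all possible elements in the second index
-- 			for k in a: # loop through all possible elements in the third index
-- 				if (not (i == j)) and (not (i == k)) and (not (j == k)): # avoid duplicate elements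
-- 					temp = [i,j,k] # potential candidate for buffer insertion
-- 					for n in buffer: # loop through the lists we have already added to the buffer
-- 						if equal(n, temp): # compare the candidate to the existing lists
-- 							break # if the candidate is equivalent to any list in the buffer, it should be skipped
-- 					else: # the candidate was not equivalent to any list in the buffer...
-- 						buffer.append(temp) # ... therefore it sould be added!
-- 	buffer.sort() # make things look nice
-- 	return buffer # return the results
-- ===== SOURCE B (Python) =====
-- def listTriples(a):
-- 	# Canonicalise first (distinct values in first-occurrence order), then enumerate
-- 	# each 3-subset once, instead of generating all ordered triples and deduping.
-- 	uniq = []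
-- 	for x in a:
-- 		if x not in uniq:
-- 			uniq.append(x)
-- 	out = combs(uniq, 3)
-- 	out.sort()
-- 	return out
--
-- def combs(vs, r):
-- 	# all r-element sublists of vs, keeping vs's order
-- 	if r == 0:
-- 		return [[]]
-- 	if not vs:
-- 		return []
-- 	head, tail = vs[0], vs[1:]
-- 	return [[head] + c for c in combs(tail, r - 1)] + combs(tail, r)
-- ===== Notes on version B (the rewrite author's own statement) =====
-- stated objective: faster
-- what changed: B deduplicates the values once (first-occurrence order) and enumerates each 3-element subset exactly once via recursive combinations, instead of scanning all n^3 ordered triples and deduplicating each candidate against the whole output buffer by pairwise set-comparison.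
import Mathlib
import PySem

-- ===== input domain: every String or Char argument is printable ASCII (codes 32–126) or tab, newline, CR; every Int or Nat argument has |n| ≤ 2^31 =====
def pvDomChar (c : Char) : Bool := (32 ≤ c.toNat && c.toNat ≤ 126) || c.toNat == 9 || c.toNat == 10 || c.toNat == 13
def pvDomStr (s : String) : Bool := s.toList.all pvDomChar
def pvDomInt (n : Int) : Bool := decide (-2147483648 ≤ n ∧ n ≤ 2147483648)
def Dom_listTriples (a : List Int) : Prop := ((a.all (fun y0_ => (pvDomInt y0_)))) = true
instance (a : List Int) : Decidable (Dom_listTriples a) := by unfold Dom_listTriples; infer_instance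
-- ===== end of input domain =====

-- B deduplicates the values once and enumerates each 3-subset a single time
-- (recursive combinations), instead of scanning all ordered triples and deduping
-- against the output buffer; objective: faster.

-- ===== PORT A =====
def pyEqual (a b : List Int) : Bool :=
  a.all (fun i => b.any (fun j => i == j)) && b.all (fun i => a.any (fun j => i == j))

def listTriples (a : List Int) : List (List Int) :=
  let buffer := a.foldl (fun buf i =>
    a.foldl (fun buf j =>
      a.foldl (fun buf k =>
        if !(i == j) && !(i == k) && !(j == k) then
          if buf.any (fun n => pyEqual n [i, j, k]) then buf else buf ++ [[i, j, k]]
        else buf) buf) buf) []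
  PySem.List.sorted buffer (fun x => x)

-- ===== PORT B =====
def combsB : List Int → Nat → List (List Int)
  | _, 0 => [[]]
  | [], _ + 1 => []
  | v :: vs, r + 1 => (combsB vs r).map (v :: ·) ++ combsB vs (r + 1)

def listTriples_alt (a : List Int) : List (List Int) :=
  let uniq := a.foldl (fun u x => if u.contains x then u else u ++ [x]) []
  PySem.List.sorted (combsB uniq 3) (fun x => x)

-- ===== PRECONDITION & SPEC =====
def Spec_listTriples (a : List Int) (out : List (List Int)) : Prop := out = listTriples_alt a
instance (a : List Int) (out : List (List Int)) : Decidable (Spec_listTriples a out) := by unfold Spec_listTriples; infer_instance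

-- ===== CLAIM (what is proved, stated in full; the proofs are below) =====
def Claim_equal_listTriples : Prop := ∀ (a : List Int), Dom_listTriples a → Spec_listTriples a (listTriples a)

-- ===== LEMMAS AND PROOFS =====

-- proof-side names for the three nested loops of A
def stepK (i j : Int) (buf : List (List Int)) (k : Int) : List (List Int) :=
  if !(i == j) && !(i == k) && !(j == k) then
    if buf.any (fun n => pyEqual n [i, j, k]) then buf else buf ++ [[i, j, k]]
  else buf

def stepJ (a : List Int) (i : Int) (buf : List (List Int)) (j : Int) : List (List Int) :=
  a.foldl (stepK i j) buf

def stepI (a : List Int) (buf : List (List Int)) (i : Int) : List (List Int) :=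
  a.foldl (stepJ a i) buf

def bufA (a : List Int) : List (List Int) := a.foldl (stepI a) []

lemma listTriples_eq (a : List Int) :
    listTriples a = PySem.List.sorted (bufA a) (fun x => x) := rfl

-- "x occurs (first) strictly before y in a"
def bfr (a : List Int) (x y : Int) : Prop := List.idxOf x a < List.idxOf y a

-- a triple of values of a listed in first-occurrence order
def Asc (a t : List Int) : Prop :=
  ∃ x y z, t = [x, y, z] ∧ x ∈ a ∧ y ∈ a ∧ z ∈ a ∧ bfr a x y ∧ bfr a y z

def memEq (n m : List Int) : Prop := ∀ w : Int, w ∈ n ↔ w ∈ m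

-- the value-set {x,y,z} is already represented in the buffer
def cov (B : List (List Int)) (x y z : Int) : Prop :=
  ∃ n ∈ B, ∀ w : Int, w ∈ n ↔ (w = x ∨ w = y ∨ w = z)

def WF (a : List Int) (B : List (List Int)) : Prop :=
  (∀ t ∈ B, Asc a t) ∧ B.Pairwise (fun n m => ¬ memEq n m)

def covI (a done : List Int) (B : List (List Int)) : Prop :=
  ∀ x y z : Int, x ∈ a → y ∈ a → z ∈ a → x ≠ y → x ≠ z → y ≠ z →
    (x ∈ done ∨ y ∈ done ∨ z ∈ done) → cov B x y z

def covJ (a : List Int) (i : Int) (done : List Int) (B : List (List Int)) : Prop :=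
  ∀ y z : Int, y ∈ a → z ∈ a → i ≠ y → i ≠ z → y ≠ z →
    (y ∈ done ∨ z ∈ done) → cov B i y z

def covK (i j : Int) (done : List Int) (B : List (List Int)) : Prop :=
  ∀ z ∈ done, i ≠ j → i ≠ z → j ≠ z → cov B i j z

lemma sorted_inst_congr {α κ : Type} (i1 i2 : LT κ) (d1 : @DecidableLT κ i1)
    (d2 : @DecidableLT κ i2) (h : i1 = i2) (xs : List α) (key : α → κ) :
    @PySem.List.sorted α κ i1 d1 xs key false = @PySem.List.sorted α κ i2 d2 xs key false := by
  subst h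
  congr 1

lemma cov_append {B E : List (List Int)} {x y z : Int} (h : cov B x y z) :
    cov (B ++ E) x y z := by
  obtain ⟨n, hn, hw⟩ := h
  exact ⟨n, List.mem_append_left _ hn, hw⟩

lemma cov_reorder {B : List (List Int)} {x y z x' y' z' : Int}
    (h : cov B x y z)
    (hperm : ∀ w : Int, (w = x' ∨ w = y' ∨ w = z') ↔ (w = x ∨ w = y ∨ w = z)) :
    cov B x' y' z' := by
  obtain ⟨n, hn, hw⟩ := h
  exact ⟨n, hn, fun w => (hw w).trans (hperm w).symm⟩

lemma pyEqual_iff (n m : List Int) : pyEqual n m = true ↔ memEq n m := by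
  simp only [pyEqual, Bool.and_eq_true, List.all_eq_true, List.any_eq_true, beq_iff_eq, memEq]
  constructor
  · rintro ⟨h1, h2⟩ w
    constructor
    · intro hw; obtain ⟨v, hv, rfl⟩ := h1 w hw; exact hv
    · intro hw; obtain ⟨v, hv, rfl⟩ := h2 w hw; exact hv
  · intro h
    exact ⟨fun w hw => ⟨w, (h w).mp hw, rfl⟩, fun w hw => ⟨w, (h w).mpr hw, rfl⟩⟩

lemma idxOf_split_self {a done rest : List Int} {x : Int}
    (h : a = done ++ x :: rest) (hx : x ∉ done) :
    List.idxOf x a = done.length := by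
  subst h
  rw [List.idxOf_append, if_neg hx]
  simp

lemma idxOf_split_gt {a done rest : List Int} {x w : Int}
    (h : a = done ++ x :: rest) (hw : w ∉ done) (hne : w ≠ x) :
    done.length < List.idxOf w a := by
  subst h
  rw [List.idxOf_append, if_neg hw, List.idxOf_cons_ne _ (by simpa using hne.symm)]
  omega

lemma asc_of_new {a dI rI dJ rJ : List Int} {i j k : Int} {B : List (List Int)}
    (hI : a = dI ++ i :: rI) (hJ : a = dJ ++ j :: rJ) (hk : k ∈ a)
    (hij : i ≠ j) (hik : i ≠ k) (hjk : j ≠ k)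
    (hnc : ¬ cov B i j k) (hcI : covI a dI B) (hcJ : covJ a i dJ B) :
    Asc a [i, j, k] := by
  have hi : i ∈ a := by rw [hI]; simp
  have hj : j ∈ a := by rw [hJ]; simp
  have hiI : i ∉ dI := fun h => hnc (hcI i j k hi hj hk hij hik hjk (Or.inl h))
  have hjI : j ∉ dI := fun h => hnc (hcI i j k hi hj hk hij hik hjk (Or.inr (Or.inl h)))
  have hjJ : j ∉ dJ := fun h => hnc (hcJ j k hj hk hij hik hjk (Or.inl h))
  have hkJ : k ∉ dJ := fun h => hnc (hcJ j k hj hk hij hik hjk (Or.inr h))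
  refine ⟨i, j, k, rfl, hi, hj, hk, ?_, ?_⟩
  · unfold bfr
    have h1 := idxOf_split_self hI hiI
    have h2 := idxOf_split_gt hI hjI (Ne.symm hij)
    omega
  · unfold bfr
    have h1 := idxOf_split_self hJ hjJ
    have h2 := idxOf_split_gt hJ hkJ (Ne.symm hjk)
    omega

lemma lemK (a : List Int) (i j : Int) (dI rI dJ rJ : List Int)
    (hI : a = dI ++ i :: rI) (hJ : a = dJ ++ j :: rJ) :
    ∀ ks doneK B, a = doneK ++ ks →
    WF a B → covI a dI B → covJ a i dJ B → covK i j doneK B →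
    ∃ E, ks.foldl (stepK i j) B = B ++ E ∧ WF a (B ++ E) ∧
      covK i j (doneK ++ ks) (B ++ E) := by
  intro ks
  induction ks with
  | nil =>
    intro doneK B _ hWF _ _ hcK
    exact ⟨[], by simp, by simpa using hWF, by simpa using hcK⟩
  | cons k ks ih =>
    intro doneK B ha hWF hcI hcJ hcK
    have hk : k ∈ a := by rw [ha]; simp
    -- one step of the innermost loop
    have hstep : ∃ E₁, stepK i j B k = B ++ E₁ ∧ WF a (B ++ E₁) ∧
        covK i j (doneK ++ [k]) (B ++ E₁) := by
      unfold stepK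
      by_cases hd : (!(i == j) && !(i == k) && !(j == k)) = true
      · have hd' : i ≠ j ∧ i ≠ k ∧ j ≠ k := by
          simpa [and_assoc] using hd
        rw [if_pos hd]
        by_cases hany : (B.any (fun n => pyEqual n [i, j, k])) = true
        · rw [if_pos hany]
          refine ⟨[], by simp, by simpa using hWF, ?_⟩
          intro z hz hij hiz hjz
          rcases List.mem_append.mp hz with h | h
          · simpa using hcK z h hij hiz hjz
          · simp only [List.mem_singleton] at h
            subst h
            obtain ⟨n, hn, hpe⟩ := List.any_eq_true.mp hany
            refine cov_append ⟨n, hn, ?_⟩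
            intro w
            rw [(pyEqual_iff n _).mp hpe w]
            simp
        · rw [if_neg hany]
          have hnc : ¬ cov B i j k := by
            intro ⟨n, hn, hw⟩
            apply hany
            refine List.any_eq_true.mpr ⟨n, hn, (pyEqual_iff n _).mpr ?_⟩
            intro w
            rw [hw w]
            simp
          refine ⟨[[i, j, k]], rfl, ?_, ?_⟩
          · constructor
            · intro t ht
              rcases List.mem_append.mp ht with h | h
              · exact hWF.1 t h
              · simp only [List.mem_singleton] at h
                subst h
                exact asc_of_new hI hJ hk hd'.1 hd'.2.1 hd'.2.2 hnc hcI hcJ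
            · rw [List.pairwise_append]
              refine ⟨hWF.2, by simp, ?_⟩
              intro n hn m hm
              simp only [List.mem_singleton] at hm
              subst hm
              intro hme
              apply hnc
              exact ⟨n, hn, fun w => (hme w).trans (by simp)⟩
          · intro z hz hij hiz hjz
            rcases List.mem_append.mp hz with h | h
            · exact cov_append (hcK z h hij hiz hjz)
            · simp only [List.mem_singleton] at h
              subst h
              exact ⟨[i, j, z], by simp, fun w => by simp⟩
      · rw [if_neg hd]
        refine ⟨[], by simp, by simpa using hWF, ?_⟩
        intro z hz hij hiz hjz
        rcases List.mem_append.mp hz with h | h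
        · simpa using hcK z h hij hiz hjz
        · simp only [List.mem_singleton] at h
          subst h
          exact absurd (by simp [hij, hiz, hjz]) hd
    obtain ⟨E₁, hE₁, hWF₁, hcK₁⟩ := hstep
    have hcI₁ : covI a dI (B ++ E₁) := fun x y z hx hy hz h1 h2 h3 h4 =>
      cov_append (hcI x y z hx hy hz h1 h2 h3 h4)
    have hcJ₁ : covJ a i dJ (B ++ E₁) := fun y z hy hz h1 h2 h3 h4 =>
      cov_append (hcJ y z hy hz h1 h2 h3 h4)
    obtain ⟨E₂, hE₂, hWF₂, hcK₂⟩ := ih (doneK ++ [k]) (B ++ E₁)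
      (by simpa using ha) hWF₁ hcI₁ hcJ₁ hcK₁
    refine ⟨E₁ ++ E₂, ?_, ?_, ?_⟩
    · rw [List.foldl_cons, hE₁, hE₂, List.append_assoc]
    · rw [← List.append_assoc]; exact hWF₂
    · rw [← List.append_assoc]
      intro z hz h1 h2 h3
      apply hcK₂ z _ h1 h2 h3
      simpa [or_assoc] using hz

lemma lemJ (a : List Int) (i : Int) (dI rI : List Int) (hI : a = dI ++ i :: rI) :
    ∀ js doneJ B, a = doneJ ++ js →
    WF a B → covI a dI B → covJ a i doneJ B →
    ∃ E, js.foldl (stepJ a i) B = B ++ E ∧ WF a (B ++ E) ∧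
      covJ a i (doneJ ++ js) (B ++ E) := by
  intro js
  induction js with
  | nil =>
    intro doneJ B _ hWF _ hcJ
    exact ⟨[], by simp, by simpa using hWF, by simpa using hcJ⟩
  | cons j js ih =>
    intro doneJ B ha hWF hcI hcJ
    obtain ⟨E₁, hE₁, hWF₁, hcK₁⟩ := lemK a i j dI rI doneJ js hI ha a [] B
      (by simp) hWF hcI hcJ (by intro z hz; simp at hz)
    have hcI₁ : covI a dI (B ++ E₁) := fun x y z hx hy hz h1 h2 h3 h4 =>
      cov_append (hcI x y z hx hy hz h1 h2 h3 h4)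
    have hcJ₁ : covJ a i (doneJ ++ [j]) (B ++ E₁) := by
      intro y z hy hz h1 h2 h3 h4
      rcases h4 with h | h
      all_goals rcases List.mem_append.mp h with h | h
      · exact cov_append (hcJ y z hy hz h1 h2 h3 (Or.inl h))
      · simp only [List.mem_singleton] at h
        subst h
        exact hcK₁ z (by simpa using hz) h1 h2 h3
      · exact cov_append (hcJ y z hy hz h1 h2 h3 (Or.inr h))
      · simp only [List.mem_singleton] at h
        subst h
        refine cov_reorder (hcK₁ y (by simpa using hy) h2 h1 (fun hh => h3 hh.symm)) ?_
        intro w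
        constructor
        · rintro (h | h | h) <;> simp [h]
        · rintro (h | h | h) <;> simp [h]
    obtain ⟨E₂, hE₂, hWF₂, hcJ₂⟩ := ih (doneJ ++ [j]) (B ++ E₁)
      (by simpa using ha) hWF₁ hcI₁ hcJ₁
    refine ⟨E₁ ++ E₂, ?_, ?_, ?_⟩
    · rw [List.foldl_cons, show stepJ a i B j = B ++ E₁ from hE₁, hE₂, List.append_assoc]
    · rw [← List.append_assoc]; exact hWF₂
    · rw [← List.append_assoc]
      intro y z hy hz h1 h2 h3 h4
      apply hcJ₂ y z hy hz h1 h2 h3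
      rcases h4 with h | h
      · exact Or.inl (by simpa [or_assoc] using h)
      · exact Or.inr (by simpa [or_assoc] using h)

lemma lemI (a : List Int) :
    ∀ is doneI B, a = doneI ++ is →
    WF a B → covI a doneI B →
    ∃ E, is.foldl (stepI a) B = B ++ E ∧ WF a (B ++ E) ∧
      covI a (doneI ++ is) (B ++ E) := by
  intro is
  induction is with
  | nil =>
    intro doneI B _ hWF hcI
    exact ⟨[], by simp, by simpa using hWF, by simpa using hcI⟩
  | cons i is ih =>
    intro doneI B ha hWF hcI
    obtain ⟨E₁, hE₁, hWF₁, hcJ₁⟩ := lemJ a i doneI is ha a [] B (by simp) hWF hcI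
      (by intro y z _ _ _ _ _ h; simp at h)
    have hcI₁ : covI a (doneI ++ [i]) (B ++ E₁) := by
      intro x y z hx hy hz h1 h2 h3 h4
      have hcJfull : ∀ y z : Int, y ∈ a → z ∈ a → i ≠ y → i ≠ z → y ≠ z →
          cov (B ++ E₁) i y z := fun y z hy hz p1 p2 p3 =>
        hcJ₁ y z hy hz p1 p2 p3 (Or.inl hy)
      rcases h4 with h | h | h
      · rcases List.mem_append.mp h with h | h
        · exact cov_append (hcI x y z hx hy hz h1 h2 h3 (Or.inl h))
        · simp only [List.mem_singleton] at h
          subst h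
          exact hcJfull y z hy hz h1 h2 h3
      · rcases List.mem_append.mp h with h | h
        · exact cov_append (hcI x y z hx hy hz h1 h2 h3 (Or.inr (Or.inl h)))
        · simp only [List.mem_singleton] at h
          subst h
          refine cov_reorder (hcJfull x z hx hz (Ne.symm h1) h3 h2) ?_
          intro w
          constructor
          · rintro (h | h | h) <;> simp [h]
          · rintro (h | h | h) <;> simp [h]
      · rcases List.mem_append.mp h with h | h
        · exact cov_append (hcI x y z hx hy hz h1 h2 h3 (Or.inr (Or.inr h)))
        · simp only [List.mem_singleton] at h
          subst h
          refine cov_reorder (hcJfull x y hx hy (Ne.symm h2) (Ne.symm h3) h1) ?_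
          intro w
          constructor
          · rintro (h | h | h) <;> simp [h]
          · rintro (h | h | h) <;> simp [h]
    obtain ⟨E₂, hE₂, hWF₂, hcI₂⟩ := ih (doneI ++ [i]) (B ++ E₁)
      (by simpa using ha) hWF₁ hcI₁
    refine ⟨E₁ ++ E₂, ?_, ?_, ?_⟩
    · rw [List.foldl_cons, show stepI a B i = B ++ E₁ from hE₁, hE₂, List.append_assoc]
    · rw [← List.append_assoc]; exact hWF₂
    · rw [← List.append_assoc]
      intro x y z hx hy hz h1 h2 h3 h4
      apply hcI₂ x y z hx hy hz h1 h2 h3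
      rcases h4 with h | h | h
      · exact Or.inl (by simpa [or_assoc] using h)
      · exact Or.inr (Or.inl (by simpa [or_assoc] using h))
      · exact Or.inr (Or.inr (by simpa [or_assoc] using h))

lemma bufA_wf (a : List Int) : WF a (bufA a) ∧ covI a a (bufA a) := by
  obtain ⟨E, hE, hWF, hcI⟩ := lemI a a [] [] rfl ⟨by simp, by simp⟩
    (fun x y z _ _ _ _ _ _ h => by simp at h)
  rw [show bufA a = [] ++ E from hE]
  exact ⟨hWF, by simpa using hcI⟩

lemma bfr_ne {a : List Int} {x y : Int} (h : bfr a x y) : x ≠ y := by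
  intro he
  subst he
  exact Nat.lt_irrefl _ h

lemma asc_ext (a : List Int) {n m : List Int} (hn : Asc a n) (hm : Asc a m)
    (h : ∀ w : Int, w ∈ n ↔ w ∈ m) : n = m := by
  obtain ⟨x, y, z, rfl, hxa, hya, hza, h1, h2⟩ := hn
  obtain ⟨p, q, r, rfl, hpa, hqa, hra, g1, g2⟩ := hm
  have h3 : bfr a x z := Nat.lt_trans h1 h2
  have g3 : bfr a p r := Nat.lt_trans g1 g2
  refine List.Perm.eq_of_pairwise
    (le := fun u v => List.idxOf u a ≤ List.idxOf v a) ?_ ?_ ?_ ?_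
  · intro u v hu hv huv hvu
    have hua : u ∈ a := by
      simp only [List.mem_cons, List.not_mem_nil, or_false] at hu
      rcases hu with rfl | rfl | rfl <;> assumption
    have hva : v ∈ a := by
      simp only [List.mem_cons, List.not_mem_nil, or_false] at hv
      rcases hv with rfl | rfl | rfl <;> assumption
    have hlu : List.idxOf u a < a.length := List.idxOf_lt_length_iff.mpr hua
    have hlv : List.idxOf v a < a.length := List.idxOf_lt_length_iff.mpr hva
    have heq : List.idxOf u a = List.idxOf v a := Nat.le_antisymm huv hvu
    have : a[List.idxOf u a] = a[List.idxOf v a] := by congr 1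
    rwa [List.getElem_idxOf hlu, List.getElem_idxOf hlv] at this
  · refine List.Pairwise.cons ?_ (List.Pairwise.cons ?_ (List.pairwise_singleton _ _))
    · intro w hw
      rcases List.mem_cons.mp hw with rfl | hw
      · exact Nat.le_of_lt h1
      · rcases List.mem_singleton.mp hw with rfl
        exact Nat.le_of_lt h3
    · intro w hw
      rcases List.mem_singleton.mp hw with rfl
      exact Nat.le_of_lt h2
  · refine List.Pairwise.cons ?_ (List.Pairwise.cons ?_ (List.pairwise_singleton _ _))
    · intro w hw
      rcases List.mem_cons.mp hw with rfl | hw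
      · exact Nat.le_of_lt g1
      · rcases List.mem_singleton.mp hw with rfl
        exact Nat.le_of_lt g3
    · intro w hw
      rcases List.mem_singleton.mp hw with rfl
      exact Nat.le_of_lt g2
  · refine (List.perm_ext_iff_of_nodup ?_ ?_).mpr h
    · simp [bfr_ne h1, bfr_ne h2, bfr_ne h3]
    · simp [bfr_ne g1, bfr_ne g2, bfr_ne g3]

lemma mem_bufA (a t : List Int) : t ∈ bufA a ↔ Asc a t := by
  constructor
  · exact fun h => (bufA_wf a).1.1 t h
  · rintro ⟨x, y, z, rfl, hx, hy, hz, hxy, hyz⟩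
    have hxz : bfr a x z := Nat.lt_trans hxy hyz
    obtain ⟨n, hn, hw⟩ := (bufA_wf a).2 x y z hx hy hz
      (bfr_ne hxy) (bfr_ne hxz) (bfr_ne hyz) (Or.inl hx)
    have hnasc : Asc a n := (bufA_wf a).1.1 n hn
    have : n = [x, y, z] := by
      refine asc_ext a hnasc ⟨x, y, z, rfl, hx, hy, hz, hxy, hyz⟩ ?_
      intro w
      rw [hw w]
      simp
    rwa [this] at hn

lemma nodup_bufA (a : List Int) : (bufA a).Nodup := by
  refine (bufA_wf a).1.2.imp ?_
  intro n m h he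
  exact h (he ▸ fun w => Iff.rfl)

-- the B side
def uniqB (a : List Int) : List Int :=
  a.foldl (fun u x => if u.contains x then u else u ++ [x]) []

lemma listTriples_alt_eq (a : List Int) :
    listTriples_alt a = PySem.List.sorted (combsB (uniqB a) 3) (fun x => x) := rfl

lemma uniqB_eq (a : List Int) : uniqB a = PySem.List.dedup a := by
  rw [PySem.List.dedup_eq_ofList, PySem.Set.ofList_eq_foldl]
  rfl

lemma uniq_pair_aux (a : List Int) : ∀ (l done s : List Int), a = done ++ l →
    (∀ y, y ∈ s ↔ y ∈ done) → s.Pairwise (bfr a) →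
    (∀ y ∈ s, List.idxOf y a < done.length) →
    (l.foldl (fun u x => if u.contains x then u else u ++ [x]) s).Pairwise (bfr a) := by
  intro l
  induction l with
  | nil => intro done s _ _ hp _; simpa using hp
  | cons x l ih =>
    intro done s ha hmem hp hb
    rw [List.foldl_cons]
    by_cases hc : s.contains x
    · rw [if_pos hc]
      have hxs : x ∈ s := by simpa using hc
      refine ih (done ++ [x]) s (by simpa using ha) ?_ hp ?_
      · intro y
        rw [hmem y]
        simp only [List.mem_append, List.mem_singleton]
        constructor
        · exact Or.inl
        · rintro (h | rfl)
          · exact h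
          · exact (hmem y).mp hxs
      · intro y hy
        have := hb y hy
        simp only [List.length_append, List.length_singleton]
        omega
    · rw [if_neg hc]
      have hxs : x ∉ s := by simpa using hc
      have hxd : x ∉ done := fun h => hxs ((hmem x).mpr h)
      have hix : List.idxOf x a = done.length := idxOf_split_self ha hxd
      refine ih (done ++ [x]) (s ++ [x]) (by simpa using ha) ?_ ?_ ?_
      · intro y
        simp only [List.mem_append, List.mem_singleton, hmem y]
      · rw [List.pairwise_append]
        refine ⟨hp, by simp, ?_⟩
        intro y hy z hz
        simp only [List.mem_singleton] at hz
        subst hz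
        unfold bfr
        rw [hix]
        exact hb y hy
      · intro y hy
        simp only [List.length_append, List.length_singleton]
        rcases List.mem_append.mp hy with h | h
        · have := hb y h; omega
        · simp only [List.mem_singleton] at h; subst h; omega

lemma pairwise_bfr_uniqB (a : List Int) : (uniqB a).Pairwise (bfr a) := by
  exact uniq_pair_aux a a [] [] rfl (by simp) (by simp) (by simp)

lemma combsB_eq (vs : List Int) (r : Nat) :
    combsB vs r = PySem.List.combinations vs r := by
  induction vs generalizing r with
  | nil => cases r with
    | zero => simp [combsB, PySem.List.combinations_zero]
    | succ r => simp [combsB, PySem.List.combinations_nil_succ]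
  | cons v vs ih => cases r with
    | zero => simp [combsB, PySem.List.combinations_zero]
    | succ r => rw [combsB, PySem.List.combinations_cons_succ, ih, ih]

lemma nodup_combsB (vs : List Int) (hvs : vs.Nodup) (r : Nat) :
    (combsB vs r).Nodup := by
  induction vs generalizing r with
  | nil => cases r <;> simp [combsB]
  | cons v vs ih =>
    have hv : v ∉ vs := (List.nodup_cons.mp hvs).1
    have hnd := (List.nodup_cons.mp hvs).2
    cases r with
    | zero => simp [combsB]
    | succ r =>
      rw [combsB]
      refine List.Nodup.append ?_ (ih hnd _) ?_
      · exact (ih hnd _).map (fun x y h => by injection h)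
      · intro t ht1 ht2
        simp only [List.mem_map] at ht1
        obtain ⟨c, _, rfl⟩ := ht1
        rw [combsB_eq, PySem.List.mem_combinations_iff] at ht2
        exact hv (ht2.1.subset (List.mem_cons_self ..))

lemma idx_lt_of_bfr {a u : List Int} {x y : Int} (hu : u.Pairwise (bfr a))
    (hx : x ∈ u) (hy : y ∈ u) (hb : bfr a x y) :
    List.idxOf x u < List.idxOf y u := by
  have hpx : List.idxOf x u < u.length := List.idxOf_lt_length_iff.mpr hx
  have hpy : List.idxOf y u < u.length := List.idxOf_lt_length_iff.mpr hy
  have hPW := List.pairwise_iff_getElem.mp hu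
  rcases Nat.lt_trichotomy (List.idxOf x u) (List.idxOf y u) with h | h | h
  · exact h
  · exfalso
    have hxy : x = y := by
      have h2 : u[List.idxOf x u] = u[List.idxOf y u] := by congr 1
      rw [List.getElem_idxOf hpx, List.getElem_idxOf hpy] at h2
      exact h2
    subst hxy
    exact Nat.lt_irrefl _ hb
  · exfalso
    have := hPW _ _ hpy hpx h
    rw [List.getElem_idxOf hpy, List.getElem_idxOf hpx] at this
    exact Nat.lt_asymm hb this

lemma asc_iff_mem_combs (a t : List Int) :
    Asc a t ↔ t ∈ combsB (uniqB a) 3 := by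
  have hu : (uniqB a).Pairwise (bfr a) := pairwise_bfr_uniqB a
  have hmem : ∀ x : Int, x ∈ uniqB a ↔ x ∈ a := by
    intro x
    rw [uniqB_eq]
    exact PySem.List.mem_dedup a x
  rw [combsB_eq, PySem.List.mem_combinations_iff]
  constructor
  · rintro ⟨x, y, z, rfl, hxa, hya, hza, hxy, hyz⟩
    refine ⟨?_, rfl⟩
    have hxu := (hmem x).mpr hxa
    have hyu := (hmem y).mpr hya
    have hzu := (hmem z).mpr hza
    have hpx := List.idxOf_lt_length_iff.mpr hxu
    have hpy := List.idxOf_lt_length_iff.mpr hyu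
    have hpz := List.idxOf_lt_length_iff.mpr hzu
    have h1 := idx_lt_of_bfr hu hxu hyu hxy
    have h2 := idx_lt_of_bfr hu hyu hzu hyz
    have hsub := List.map_getElem_sublist
      (l := uniqB a) (is := [⟨_, hpx⟩, ⟨_, hpy⟩, ⟨_, hpz⟩])
      (by simp [List.pairwise_cons]; exact ⟨⟨h1, Nat.lt_trans h1 h2⟩, h2⟩)
    simpa [List.getElem_idxOf] using hsub
  · rintro ⟨hsub, hlen⟩
    obtain ⟨x, y, z, rfl⟩ := List.length_eq_three.mp hlen
    have hpw := List.Pairwise.sublist hsub hu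
    simp only [List.pairwise_cons] at hpw
    have hss := hsub.subset
    exact ⟨x, y, z, rfl, (hmem x).mp (hss (by simp)), (hmem y).mp (hss (by simp)),
      (hmem z).mp (hss (by simp)), hpw.1 y (by simp), hpw.2.1 z (by simp)⟩

-- ===== VERDICT (by name: the statement is the Claim_ definition above) =====
theorem listTriples_spec : Claim_equal_listTriples := by
  intro a _
  unfold Spec_listTriples
  rw [listTriples_eq, listTriples_alt_eq]
  rw [sorted_inst_congr (List.instLT) (List.instLinearOrder.toLT : LT (List ℤ)) _ _
    (by with_unfolding_all rfl) (bufA a) (fun x => x),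
    sorted_inst_congr (List.instLT) (List.instLinearOrder.toLT : LT (List ℤ)) _ _
    (by with_unfolding_all rfl) (combsB (uniqB a) 3) (fun x => x)]
  apply PySem.List.sorted_eq_sorted_of_perm _ _ _ (fun _ _ h => h)
  refine (List.perm_ext_iff_of_nodup (nodup_bufA a) ?_).mpr ?_
  · exact nodup_combsB _ (by rw [uniqB_eq]; exact PySem.List.nodup_dedup a) 3
  · intro t
    rw [mem_bufA, asc_iff_mem_combs]
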